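-- pv_equiv track=rewrite | github.com/sashazh39-bit/cheketop2131 | gen_sbp_receipt.py | _can_render
-- ===== SOURCE A (Python) =====
-- def _can_render(text: str, avail_cps: set[int]) -> bool:
--     """True if every character of *text* is in *avail_cps*."""
--     for ch in text:
--         cp = ord(ch)
--         if cp == 0x20:
--             cp = 0xA0
--         if cp >= 0x20 and cp not in avail_cps:
--             return False
--     return True
-- ===== SOURCE B (Python) =====
-- def _can_render(text: str, avail_cps: set[int]) -> bool:
--     """True if every character of *text* is in *avail_cps*."""
--     needed = sorted({0xA0 if cp == 0x20 else cp for cp in map(ord, text) if cp >= 0x20})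
--     have = sorted(avail_cps)
--     i = j = 0
--     while i < len(needed):
--         if j == len(have):
--             return False
--         if have[j] < needed[i]:
--             j += 1
--         elif have[j] == needed[i]:
--             i += 1
--             j += 1
--         else:
--             return False
--     return True
-- ===== Notes on version B (the rewrite author's own statement) =====
-- stated objective: alternative
-- what changed: Replaces A's per-character early-return scan with set-membership tests by sorting the distinct remapped codepoints of the text and the available codepoints and checking subset inclusion with a single two-pointer merge scan, with no per-element membership test.
import Mathlib
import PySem

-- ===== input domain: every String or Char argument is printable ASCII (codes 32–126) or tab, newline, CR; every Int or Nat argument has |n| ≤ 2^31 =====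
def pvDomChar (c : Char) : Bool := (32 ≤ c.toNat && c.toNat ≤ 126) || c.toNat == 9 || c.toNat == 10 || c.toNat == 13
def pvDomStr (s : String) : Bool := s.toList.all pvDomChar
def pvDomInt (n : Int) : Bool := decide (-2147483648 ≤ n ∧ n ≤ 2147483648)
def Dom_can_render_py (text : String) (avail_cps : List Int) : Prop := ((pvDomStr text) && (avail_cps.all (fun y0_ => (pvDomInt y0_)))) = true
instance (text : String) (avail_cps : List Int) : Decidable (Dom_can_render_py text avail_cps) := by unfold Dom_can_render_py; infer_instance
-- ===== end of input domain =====

-- B sorts the distinct remapped codepoints of the text and the available codepoints and checks subset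
-- inclusion with one two-pointer merge scan, instead of A's per-character scan with membership tests
-- and early return (objective: alternative; not claimed faster).

-- ===== PORT A =====
-- loop of A: early return False on first offending character
def canRenderGo (avail_cps : List Int) : List Char → Bool
  | [] => true
  | ch :: rest =>
    let cp : Int := ch.toNat
    let cp : Int := if cp = 0x20 then 0xA0 else cp
    if 0x20 ≤ cp ∧ cp ∉ avail_cps then false else canRenderGo avail_cps rest

def can_render_py (text : String) (avail_cps : List Int) : Bool :=
  canRenderGo avail_cps text.toList

-- ===== PORT B =====
-- Source B's while loop over the two sorted lists, indices i/j rendered as the remaining suffixes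
def mergeSubset : List Int → List Int → Bool
  | [], _ => true
  | _ :: _, [] => false
  | n :: ns, h :: hs =>
    if h < n then mergeSubset (n :: ns) hs
    else if h = n then mergeSubset ns hs
    else false
termination_by ns hs => ns.length + hs.length

def can_render_py_alt (text : String) (avail_cps : List Int) : Bool :=
  let needed : List Int :=
    PySem.List.sorted
      (PySem.Set.ofList (((text.toList.map (fun ch => (ch.toNat : Int))).filter
        (fun cp => 0x20 ≤ cp)).map (fun cp => if cp = 0x20 then (0xA0 : Int) else cp)))
      (fun x => x) false
  let have_ : List Int := PySem.List.sorted avail_cps (fun x => x) false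
  mergeSubset needed have_

-- ===== PRECONDITION & SPEC =====
def Spec_can_render_py (text : String) (avail_cps : List Int) (out : Bool) : Prop := out = can_render_py_alt text avail_cps
instance (text : String) (avail_cps : List Int) (out : Bool) : Decidable (Spec_can_render_py text avail_cps out) := by unfold Spec_can_render_py; infer_instance

-- ===== CLAIM (what is proved, stated in full; the proofs are below) =====
def Claim_equal_can_render_py : Prop := ∀ (text : String) (avail_cps : List Int), Dom_can_render_py text avail_cps → Spec_can_render_py text avail_cps (can_render_py text avail_cps)

-- ===== LEMMAS AND PROOFS =====

-- A's loop returns true iff every remapped codepoint ≥ 0x20 is available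
theorem canRenderGo_eq_true_iff (avail : List Int) (cs : List Char) :
    canRenderGo avail cs = true ↔
      ∀ c ∈ cs, 0x20 ≤ c.toNat →
        (if (c.toNat : Int) = 0x20 then (0xA0 : Int) else (c.toNat : Int)) ∈ avail := by
  induction cs with
  | nil => simp [canRenderGo]
  | cons c rest ih =>
    simp only [canRenderGo, List.mem_cons]
    by_cases hmem : (if (c.toNat : Int) = 0x20 then (0xA0 : Int) else (c.toNat : Int)) ∈ avail
    · rw [if_neg (fun h => h.2 hmem), ih]
      constructor
      · intro hall x hx hge
        rcases hx with rfl | hx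
        · exact hmem
        · exact hall x hx hge
      · intro hall x hx hge
        exact hall x (Or.inr hx) hge
    · by_cases hge : 0x20 ≤ c.toNat
      · have hge' : (0x20 : Int) ≤ (if (c.toNat : Int) = 0x20 then (0xA0 : Int) else (c.toNat : Int)) := by
          split_ifs <;> omega
        rw [if_pos ⟨hge', hmem⟩]
        exact iff_of_false (by simp) fun hall => hmem (hall c (Or.inl rfl) hge)
      · have h32 : ¬((c.toNat : Int) = 0x20) := by omega
        have hno : ¬((0x20 : Int) ≤ (if (c.toNat : Int) = 0x20 then (0xA0 : Int) else (c.toNat : Int)) ∧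
            (if (c.toNat : Int) = 0x20 then (0xA0 : Int) else (c.toNat : Int)) ∉ avail) := by
          rintro ⟨hle, -⟩
          rw [if_neg h32] at hle
          omega
        rw [if_neg hno, ih]
        constructor
        · intro hall x hx hgx
          rcases hx with rfl | hx
          · exact absurd hgx hge
          · exact hall x hx hgx
        · intro hall x hx hgx
          exact hall x (Or.inr hx) hgx

-- the merge scan on a strictly increasing ns and a weakly increasing hs decides ns ⊆ hs
theorem mergeSubset_eq_true_iff : ∀ (ns hs : List Int),
    ns.Pairwise (· < ·) → hs.Pairwise (· ≤ ·) →
    (mergeSubset ns hs = true ↔ ∀ n ∈ ns, n ∈ hs)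
  | [], hs => by simp [mergeSubset]
  | n :: ns, [] => by
    intro _ _
    exact iff_of_false (by simp [mergeSubset]) fun hall => by simpa using hall n List.mem_cons_self
  | n :: ns, h :: hs => by
    intro hns hhs
    rw [mergeSubset]
    rcases lt_trichotomy h n with hlt | heq | hgt
    · rw [if_pos hlt, mergeSubset_eq_true_iff (n :: ns) hs hns hhs.tail]
      constructor
      · intro hall m hm
        exact List.mem_cons_of_mem h (hall m hm)
      · intro hall m hm
        have hnm : n ≤ m := by
          rcases List.mem_cons.mp hm with rfl | hm'
          · exact le_refl m
          · exact le_of_lt ((List.pairwise_cons.mp hns).1 m hm')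
        rcases List.mem_cons.mp (hall m hm) with rfl | hmem
        · omega
        · exact hmem
    · subst heq
      rw [if_neg (lt_irrefl h), if_pos rfl,
        mergeSubset_eq_true_iff ns hs hns.tail hhs.tail]
      constructor
      · intro hall m hm
        rcases List.mem_cons.mp hm with rfl | hm'
        · exact List.mem_cons_self
        · exact List.mem_cons_of_mem h (hall m hm')
      · intro hall m hm
        rcases List.mem_cons.mp (hall m (List.mem_cons_of_mem h hm)) with heq' | hmem
        · have hlt' := (List.pairwise_cons.mp hns).1 m hm
          omega
        · exact hmem
    · rw [if_neg (by omega), if_neg (by omega)]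
      refine iff_of_false (by simp) fun hall => ?_
      rcases List.mem_cons.mp (hall n List.mem_cons_self) with rfl | hmem
      · exact absurd hgt (lt_irrefl n)
      · exact absurd ((List.pairwise_cons.mp hhs).1 n hmem) (by omega)
termination_by ns hs => ns.length + hs.length

theorem alt_eq_true_iff (text : String) (avail : List Int) :
    can_render_py_alt text avail = true ↔
      ∀ c ∈ text.toList, 0x20 ≤ c.toNat →
        (if (c.toNat : Int) = 0x20 then (0xA0 : Int) else (c.toNat : Int)) ∈ avail := by
  unfold can_render_py_alt
  rw [mergeSubset_eq_true_iff _ _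
    (PySem.List.sorted_ofList_pairwise_lt _) (PySem.List.sorted_pairwise avail _)]
  simp only [PySem.List.mem_sorted, PySem.Set.mem_ofList, List.mem_map, List.mem_filter]
  constructor
  · intro h c hc hge
    exact h _ ⟨_, ⟨⟨c, hc, rfl⟩, by simpa using hge⟩, rfl⟩
  · rintro h x ⟨cp, ⟨⟨c, hc, rfl⟩, hge⟩, rfl⟩
    exact h c hc (by simpa using hge)

-- ===== VERDICT (by name: the statement is the Claim_ definition above) =====
theorem can_render_py_spec : Claim_equal_can_render_py := by
  intro text avail _
  unfold Spec_can_render_py can_render_py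
  rcases hA : canRenderGo avail text.toList with _ | _
  · rcases hB : can_render_py_alt text avail with _ | _
    · rfl
    · exact absurd (hA ▸ (canRenderGo_eq_true_iff avail text.toList).mpr
        ((alt_eq_true_iff text avail).mp hB)) (by simp)
  · exact ((alt_eq_true_iff text avail).mpr ((canRenderGo_eq_true_iff avail text.toList).mp hA)).symm
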